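-- pv_equiv track=rewrite | github.com/eshun4/FundamentalCodingInterviewPrep | 07/conecutive_int.py | solution
-- ===== SOURCE A (Python) =====
-- def solution(n):
--     # TODO: implement
--     # Create variable to store count of consecutive digits
--     consecutive_count = 0
--     # Get previous digit
--     prev_digit = None
--     # Iterate over integer
--     while n > 0:
--         current_digit = n % 10
--         if prev_digit == current_digit:
--             consecutive_count += 1
--         prev_digit = current_digit
--         # Update n using integer division
--         n //= 10
--     return consecutive_count
-- ===== SOURCE B (Python) =====
-- def solution(n):
--     if n <= 0:
--         return 0
--     s = str(n)
--     return sum(1 if a == b else 0 for a, b in zip(s, s[1:]))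
-- ===== Notes on version B (the rewrite author's own statement) =====
-- stated objective: idiomatic
-- what changed: Counts equal adjacent character pairs of str(n) left-to-right with zip, instead of peeling digits off right-to-left with % and // while tracking a prev_digit accumulator.
import Mathlib
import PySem

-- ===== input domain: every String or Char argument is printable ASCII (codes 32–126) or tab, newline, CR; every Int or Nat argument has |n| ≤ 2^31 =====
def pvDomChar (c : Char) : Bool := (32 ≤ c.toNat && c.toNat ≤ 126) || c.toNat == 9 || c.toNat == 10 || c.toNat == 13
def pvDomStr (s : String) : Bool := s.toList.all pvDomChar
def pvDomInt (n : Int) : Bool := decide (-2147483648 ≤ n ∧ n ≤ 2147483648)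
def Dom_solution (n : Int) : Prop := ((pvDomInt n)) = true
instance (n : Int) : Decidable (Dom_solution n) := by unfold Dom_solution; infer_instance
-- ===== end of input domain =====

-- B counts equal adjacent character pairs of str(n) left-to-right instead of peeling
-- digits off right-to-left with % and //; objective: more idiomatic, same cost.

-- ===== PORT A =====
-- the while-loop of A: state (n, prev_digit, consecutive_count)
def solutionLoop (n : Int) (prev : Option Int) (count : Int) : Int :=
  if h : 0 < n then
    let cur := PySem.Int.mod n 10
    solutionLoop (PySem.Int.floordiv n 10) (some cur)
      (if prev = some cur then count + 1 else count)
  else count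
termination_by n.toNat
decreasing_by
  simp only [PySem.Int.floordiv]
  rw [Int.fdiv_eq_ediv_of_nonneg _ (by norm_num : (0:Int) ≤ 10)]
  omega

def solution (n : Int) : Int := solutionLoop n none 0

-- ===== PORT B =====
def solution_alt (n : Int) : Int :=
  if n ≤ 0 then 0
  else
    let s := PySem.Int.toChars n        -- str(n)
    -- sum(1 if a == b else 0 for a, b in zip(s, s[1:]))
    ((s.zip (s.drop 1)).map (fun p => if p.1 = p.2 then (1 : Int) else 0)).sum

-- ===== PRECONDITION & SPEC =====
def Spec_solution (n : Int) (out : Int) : Prop := out = solution_alt n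
instance (n : Int) (out : Int) : Decidable (Spec_solution n out) := by unfold Spec_solution; infer_instance

-- ===== CLAIM (what is proved, stated in full; the proofs are below) =====
def Claim_equal_solution : Prop := ∀ (n : Int), Dom_solution n → Spec_solution n (solution n)

-- ===== LEMMAS AND PROOFS =====

-- number of adjacent equal pairs in a list
def pairCount {α : Type} [DecidableEq α] : List α → Int
  | a :: b :: rest => (if a = b then 1 else 0) + pairCount (b :: rest)
  | _ => 0

-- A's accumulator recursion, phrased over the LSB-first digit list
def digCount (prev : Option Int) : List Nat → Int
  | [] => 0
  | d :: ds => (if prev = some (d : Int) then 1 else 0) + digCount (some (d : Int)) ds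

lemma solutionLoop_digits (m : Nat) (prev : Option Int) (count : Int) :
    solutionLoop (m : Int) prev count = count + digCount prev (Nat.digits 10 m) := by
  induction m using Nat.strong_induction_on generalizing prev count with
  | _ m ih =>
    rw [solutionLoop]
    by_cases hm : 0 < (m : Int)
    · have hm' : 0 < m := by exact_mod_cast hm
      simp only [hm, dif_pos]
      have hmod : PySem.Int.mod (m : Int) 10 = ((m % 10 : Nat) : Int) := by
        simp only [PySem.Int.mod]
        rw [Int.fmod_eq_emod_of_nonneg _ (by norm_num : (0:Int) ≤ 10), Int.natCast_emod]
        norm_num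
      have hdiv : PySem.Int.floordiv (m : Int) 10 = ((m / 10 : Nat) : Int) := by
        simp only [PySem.Int.floordiv]
        rw [Int.fdiv_eq_ediv_of_nonneg _ (by norm_num : (0:Int) ≤ 10), Int.natCast_ediv]
        norm_num
      rw [hmod, hdiv, ih (m / 10) (Nat.div_lt_self hm' (by norm_num)),
        Nat.digits_def' (by norm_num : 1 < 10) hm']
      simp only [digCount]
      split_ifs <;> ring
    · have hm0 : m = 0 := by omega
      simp [hm0, digCount]

lemma digCount_some (p : Nat) (l : List Nat) :
    digCount (some (p : Int)) l = pairCount (p :: l) := by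
  induction l generalizing p with
  | nil => simp [digCount, pairCount]
  | cons d ds ih =>
    simp only [digCount, pairCount, ih d]
    by_cases h : p = d <;> simp [h]

lemma digCount_none (l : List Nat) : digCount none l = pairCount l := by
  cases l with
  | nil => rfl
  | cons d ds => simp [digCount, digCount_some]

lemma pairCount_append_singleton {α : Type} [DecidableEq α] (l : List α) (a : α) :
    pairCount (l ++ [a]) =
      pairCount l + (if l.getLast? = some a then 1 else 0) := by
  induction l with
  | nil => simp [pairCount]
  | cons x l ih =>
    cases l with
    | nil =>
      simp only [List.nil_append, List.cons_append, pairCount, List.getLast?_singleton]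
      by_cases h : x = a <;> simp [h]
    | cons y l' =>
      simp only [List.cons_append, pairCount] at *
      rw [ih]
      simp only [List.getLast?_cons_cons]
      ring

lemma pairCount_reverse {α : Type} [DecidableEq α] (l : List α) :
    pairCount l.reverse = pairCount l := by
  induction l with
  | nil => rfl
  | cons a l ih =>
    rw [List.reverse_cons, pairCount_append_singleton, ih, List.getLast?_reverse]
    cases l with
    | nil => simp [pairCount]
    | cons b l' =>
      simp only [pairCount, List.head?_cons, Option.some.injEq]
      by_cases h : a = b
      · simp [h]; ring
      · rw [if_neg (fun hh => h hh.symm), if_neg h]; ring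

lemma digitChar_inj {a b : Nat} (ha : a < 10) (hb : b < 10) :
    Nat.digitChar a = Nat.digitChar b ↔ a = b := by
  interval_cases a <;> interval_cases b <;> simp [Nat.digitChar]

lemma pairCount_map_digitChar (l : List Nat) (hl : ∀ d ∈ l, d < 10) :
    pairCount (l.map Nat.digitChar) = pairCount l := by
  induction l with
  | nil => rfl
  | cons a l ih =>
    cases l with
    | nil => rfl
    | cons b l' =>
      simp only [List.map_cons, pairCount] at *
      rw [ih (fun d hd => hl d (by simp_all))]
      by_cases h : a = b
      · simp [h]
      · rw [if_neg h, if_neg (fun hh =>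
          h ((digitChar_inj (hl a (by simp)) (hl b (by simp))).mp hh))]

lemma toDigitsCore_eq (fuel m : Nat) (acc : List Char) (hm : 0 < m) (hf : m ≤ fuel) :
    Nat.toDigitsCore 10 fuel m acc =
      ((Nat.digits 10 m).reverse.map Nat.digitChar) ++ acc := by
  induction fuel generalizing m acc with
  | zero => omega
  | succ f ih =>
    rw [Nat.toDigitsCore]
    rw [Nat.digits_def' (by norm_num : 1 < 10) hm]
    by_cases h0 : m / 10 = 0
    · simp [h0, Nat.digits_zero]
    · rw [if_neg h0, ih (m / 10) _ (Nat.pos_of_ne_zero h0)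
        (by have := Nat.div_lt_self hm (by norm_num : 1 < 10); omega)]
      simp

lemma zip_sum_eq_pairCount {α : Type} [DecidableEq α] (l : List α) :
    ((l.zip (l.drop 1)).map (fun p => if p.1 = p.2 then (1 : Int) else 0)).sum
      = pairCount l := by
  induction l with
  | nil => rfl
  | cons a l ih =>
    cases l with
    | nil => rfl
    | cons b l' =>
      simp only [List.drop_succ_cons, List.drop_zero, List.zip_cons_cons,
        List.map_cons, List.sum_cons, pairCount]
      rw [← ih]
      simp

-- ===== VERDICT (by name: the statement is the Claim_ definition above) =====
theorem solution_spec : Claim_equal_solution := by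
  intro n _
  unfold Spec_solution solution solution_alt
  by_cases hn : n ≤ 0
  · rw [solutionLoop]
    simp [hn, not_lt.mpr hn]
  · rw [not_le] at hn
    rw [if_neg (not_le.mpr hn)]
    have hrepr : n = ((n.toNat : Nat) : Int) := by omega
    have hpos : 0 < n.toNat := by omega
    rw [hrepr, solutionLoop_digits, digCount_none, zip_sum_eq_pairCount]
    have hchars : PySem.Int.toChars ((n.toNat : Nat) : Int) =
        (Nat.digits 10 n.toNat).reverse.map Nat.digitChar := by
      simp only [PySem.Int.toChars]
      rw [if_neg (by omega)]
      simp only [Int.toNat_natCast]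
      rw [Nat.toDigits, toDigitsCore_eq _ _ _ hpos (by omega)]
      simp
    rw [hchars, pairCount_map_digitChar _ (fun d hd => by
      have := Nat.digits_lt_base (by norm_num : 1 < 10) (List.mem_reverse.mp hd)
      omega), pairCount_reverse]
    ring
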